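-- pv_equiv track=rewrite | github.com/syed-badsha/1st-python-Assignment-1st-3M-1144 | 1st assingment.py | sum_previous_and_current
-- ===== SOURCE A (Python) =====
-- def sum_previous_and_current(numbers):
--     result = []
--     previous_number = None
--     for current_number in numbers:
--         if previous_number is not None:
--             result.append(previous_number + current_number)
--         previous_number = current_number
--     return result
-- ===== SOURCE B (Python) =====
-- def sum_previous_and_current(numbers):
--     items = list(numbers)
--     return [a + b for a, b in zip(items, items[1:])]
-- ===== Notes on version B (the rewrite author's own statement) =====
-- stated objective: idiomatic
-- what changed: Replaces the stateful loop carrying previous_number (with a None guard) by a comprehension over zip of the list with its tail, pairing adjacent elements positionally.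
import Mathlib
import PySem

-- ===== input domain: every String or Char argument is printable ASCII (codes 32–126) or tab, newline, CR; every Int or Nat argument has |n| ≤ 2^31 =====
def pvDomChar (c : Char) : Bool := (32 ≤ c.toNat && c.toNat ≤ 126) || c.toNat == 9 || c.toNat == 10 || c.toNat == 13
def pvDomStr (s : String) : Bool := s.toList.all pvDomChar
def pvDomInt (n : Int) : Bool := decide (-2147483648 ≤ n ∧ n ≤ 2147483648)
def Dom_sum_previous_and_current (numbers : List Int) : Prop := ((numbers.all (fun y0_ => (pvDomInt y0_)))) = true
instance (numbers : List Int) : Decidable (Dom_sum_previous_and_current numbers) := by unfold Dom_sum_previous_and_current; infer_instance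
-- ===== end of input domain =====

-- B replaces A's stateful loop (previous_number accumulator + None guard) by zipping the list with its tail; idiomatic, same cost.

-- ===== PORT A =====
-- A: fold carrying (result, previous_number : Option Int)
def sum_previous_and_current (numbers : List Int) : List Int :=
  (numbers.foldl
    (fun (st : List Int × Option Int) current_number =>
      let result := match st.2 with
        | some previous_number => st.1 ++ [previous_number + current_number]
        | none => st.1
      (result, some current_number))
    ([], none)).1

-- ===== PORT B =====
def sum_previous_and_current_alt (numbers : List Int) : List Int :=
  (numbers.zip (PySem.List.slice numbers (some 1) none)).map (fun p => p.1 + p.2)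

-- ===== PRECONDITION & SPEC =====
def Spec_sum_previous_and_current (numbers : List Int) (out : List Int) : Prop := out = sum_previous_and_current_alt numbers
instance (numbers : List Int) (out : List Int) : Decidable (Spec_sum_previous_and_current numbers out) := by unfold Spec_sum_previous_and_current; infer_instance

-- ===== CLAIM (what is proved, stated in full; the proofs are below) =====
def Claim_equal_sum_previous_and_current : Prop := ∀ (numbers : List Int), Dom_sum_previous_and_current numbers → Spec_sum_previous_and_current numbers (sum_previous_and_current numbers)

-- ===== LEMMAS AND PROOFS =====

-- A fold invariant
lemma spc_fold_some (numbers : List Int) (acc : List Int) (p : Int) :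
    (numbers.foldl
      (fun (st : List Int × Option Int) current_number =>
        let result := match st.2 with
          | some previous_number => st.1 ++ [previous_number + current_number]
          | none => st.1
        (result, some current_number))
      (acc, some p)).1
    = acc ++ ((p :: numbers).zip numbers).map (fun q => q.1 + q.2) := by
  induction numbers generalizing acc p with
  | nil => simp
  | cons x xs ih =>
    simp only [List.foldl_cons]
    rw [ih]
    simp

lemma spc_tail_slice (numbers : List Int) :
    PySem.List.slice numbers (some 1) none = numbers.tail :=
  PySem.List.slice_from_one numbers

-- ===== VERDICT (by name: the statement is the Claim_ definition above) =====
theorem sum_previous_and_current_spec : Claim_equal_sum_previous_and_current := by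
  intro numbers _
  unfold Spec_sum_previous_and_current sum_previous_and_current sum_previous_and_current_alt
  rw [spc_tail_slice]
  cases numbers with
  | nil => rfl
  | cons x xs =>
    simp only [List.foldl_cons]
    rw [spc_fold_some]
    simp
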